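-- pv_equiv track=rewrite | github.com/mushabo101/urairajut | uraiRajut.py | rajut
-- ===== SOURCE A (Python) =====
-- def rajut(huruf):
--   hasil = ''
--   counter = 2
--   j = 1
--   while j <= len(huruf):
--     hasil+= huruf[j-1]
--     j += counter
--     counter += 1
--   return hasil
-- ===== SOURCE B (Python) =====
-- def _isqrt(m):
--     # Newton's method for the integer square root (floor).
--     if m <= 1:
--         return m
--     x = m // 2
--     while True:
--         y = (x + m // x) // 2
--         if y >= x:
--             return x
--         x = y
--
--
-- def _is_square(m):
--     r = _isqrt(m)
--     return r * r == m
--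
--
-- def rajut(huruf):
--     # A 1-based position p = i + 1 is a triangular number iff 8*p + 1 is a perfect square.
--     return ''.join(huruf[i] for i in range(len(huruf)) if _is_square(8 * i + 9))
-- ===== Notes on version B (the rewrite author's own statement) =====
-- stated objective: alternative
-- what changed: B discards A's incremental index/step accumulators entirely: it makes one filtering pass over ALL character positions, keeping position i iff 8*i+9 is a perfect square (the number-theoretic characterisation of triangular positions), testing squareness with a hand-written Newton integer square root, and joins the kept characters.
import Mathlib
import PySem

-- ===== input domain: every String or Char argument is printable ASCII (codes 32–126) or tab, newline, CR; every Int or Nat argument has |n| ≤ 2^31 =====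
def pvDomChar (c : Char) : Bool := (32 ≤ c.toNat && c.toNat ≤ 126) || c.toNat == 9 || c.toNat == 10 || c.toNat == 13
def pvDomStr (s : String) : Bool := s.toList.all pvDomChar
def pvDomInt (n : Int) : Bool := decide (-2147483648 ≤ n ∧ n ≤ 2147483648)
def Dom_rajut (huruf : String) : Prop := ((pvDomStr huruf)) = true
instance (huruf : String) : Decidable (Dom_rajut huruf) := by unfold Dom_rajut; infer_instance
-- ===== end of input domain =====

-- B replaces A's incremental index/step stepping with one filtering pass over all
-- positions, keeping position i iff 8*i+9 is a perfect square (tested with a Newton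
-- integer square root); same values, no speed claim.

-- ===== PORT A =====
-- A's while loop over state (hasil, counter, j); fuel only makes the loop total
-- (each iteration increases j by ≥ 2, so s.length + 1 iterations always suffice).
-- huruf[j-1] is ported as getD (j-1) ' ': on every reached state 1 ≤ j ≤ len, so the
-- access is in range and getD is exact.
def rajutLoopA (s : List Char) : Nat → List Char → Nat → Nat → List Char
  | 0, hasil, _, _ => hasil
  | fuel + 1, hasil, counter, j =>
    if j ≤ s.length then
      rajutLoopA s fuel (hasil ++ [s.getD (j - 1) ' ']) (counter + 1) (j + counter)
    else hasil

def rajut (huruf : String) : String :=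
  String.mk (rajutLoopA huruf.toList (huruf.toList.length + 1) [] 2 1)

-- ===== PORT B =====
-- Source B's _isqrt: Newton's method; the while loop is the recursion on x (y < x on
-- every recursive call, so x decreases).
def newtonIter (m x : Nat) : Nat :=
  let y := (x + m / x) / 2
  if h : y < x then newtonIter m y else x
termination_by x
decreasing_by exact h

def pyIsqrt (m : Nat) : Nat := if m ≤ 1 then m else newtonIter m (m / 2)

def pyIsSquare (m : Nat) : Bool := pyIsqrt m * pyIsqrt m == m

-- Source B's generator: one pass over range(len(huruf)) keeping i with 8*i+9 a square;
-- huruf[i] with 0 ≤ i < len is in range, so getD is exact.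
def rajut_alt (huruf : String) : String :=
  String.mk ((List.range huruf.toList.length).filterMap
    (fun i => if pyIsSquare (8 * i + 9) then some (huruf.toList.getD i ' ') else none))

-- ===== PRECONDITION & SPEC =====
def Spec_rajut (huruf : String) (out : String) : Prop := out = rajut_alt huruf
instance (huruf : String) (out : String) : Decidable (Spec_rajut huruf out) := by unfold Spec_rajut; infer_instance

-- ===== CLAIM (what is proved, stated in full; the proofs are below) =====
def Claim_equal_rajut : Prop := ∀ (huruf : String), Dom_rajut huruf → Spec_rajut huruf (rajut huruf)

-- ===== LEMMAS AND PROOFS =====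

-- the k-th triangular number
def tri (m : Nat) : Nat := m * (m + 1) / 2

theorem tri_ge (k : Nat) : k ≤ tri k := by
  rcases k with _ | k
  · simp [tri]
  · rw [tri, Nat.le_div_iff_mul_le (by norm_num)]
    nlinarith

theorem tri_succ (m : Nat) : tri (m + 1) = tri m + (m + 1) := by
  unfold tri
  have h : (m + 1) * (m + 2) = m * (m + 1) + (m + 1) * 2 := by ring
  rw [h, Nat.add_mul_div_right _ _ (by norm_num)]

theorem tri_mono {a b : Nat} (h : a ≤ b) : tri a ≤ tri b := by
  induction b with
  | zero => have ha : a = 0 := by omega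
            subst ha; exact le_refl _
  | succ b ih =>
    rcases Nat.lt_or_ge a (b + 1) with h' | h'
    · exact le_trans (ih (by omega)) (by rw [tri_succ]; omega)
    · have : a = b + 1 := by omega
      subst this; exact le_refl _

theorem two_mul_tri (k : Nat) : 2 * tri k = k * (k + 1) := by
  obtain ⟨r, hr⟩ := Nat.even_mul_succ_self k
  unfold tri; rw [hr]; omega

-- the reference index list: positions tri m - 1, tri (m+1) - 1, … while tri · ≤ n
def triIdxs (n m : Nat) : List Nat :=
  if tri m ≤ n then (tri m - 1) :: triIdxs n (m + 1) else []
termination_by n + 2 - m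
decreasing_by have := tri_ge m; omega

theorem mem_triIdxs (n : Nat) :
    ∀ m i, i ∈ triIdxs n m ↔ ∃ k, m ≤ k ∧ tri k ≤ n ∧ i = tri k - 1 := by
  intro m
  induction m using triIdxs.induct n with
  | case1 m h ih =>
    intro i
    rw [triIdxs, if_pos h]
    simp only [List.mem_cons, ih]
    constructor
    · rintro (rfl | ⟨k, hk, hkn, rfl⟩)
      · exact ⟨m, le_refl _, h, rfl⟩
      · exact ⟨k, by omega, hkn, rfl⟩
    · rintro ⟨k, hk, hkn, rfl⟩
      rcases Nat.eq_or_lt_of_le hk with rfl | hk'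
      · exact Or.inl rfl
      · exact Or.inr ⟨k, by omega, hkn, rfl⟩
  | case2 m h =>
    intro i
    rw [triIdxs, if_neg h]
    simp only [List.not_mem_nil, false_iff]
    rintro ⟨k, hk, hkn, rfl⟩
    exact h (le_trans (tri_mono hk) hkn)

theorem pairwise_triIdxs (n : Nat) :
    ∀ m, 1 ≤ m → List.Pairwise (· < ·) (triIdxs n m) := by
  intro m
  induction m using triIdxs.induct n with
  | case1 m h ih =>
    intro hm
    rw [triIdxs, if_pos h]
    refine List.Pairwise.cons ?_ (ih (by omega))
    intro j hj
    obtain ⟨k, hk, _, rfl⟩ := (mem_triIdxs n (m + 1) j).mp hj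
    have h1 : tri m + (m + 1) ≤ tri k := by
      have := tri_mono hk; rw [tri_succ] at this; omega
    have h2 : m ≤ tri m := tri_ge m
    omega
  | case2 m h =>
    intro _
    rw [triIdxs, if_neg h]
    exact List.Pairwise.nil

-- A's loop, started at state (counter, j) = (m+1, tri m), emits exactly triIdxs n m
theorem loopA_eq (s : List Char) :
    ∀ fuel m acc, s.length + 1 - m ≤ fuel →
      rajutLoopA s fuel acc (m + 1) (tri m) =
        acc ++ (triIdxs s.length m).map (fun i => s.getD i ' ') := by
  intro fuel
  induction fuel with
  | zero =>
    intro m acc hf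
    have hm := tri_ge m
    rw [rajutLoopA, triIdxs, if_neg (by omega)]
    simp
  | succ fuel ih =>
    intro m acc hf
    rw [rajutLoopA, triIdxs]
    by_cases h : tri m ≤ s.length
    · rw [if_pos h, if_pos h]
      have harg : tri m + (m + 1) = tri (m + 1) := (tri_succ m).symm
      rw [harg]
      rw [ih (m + 1) _ (by omega)]
      simp
    · rw [if_neg h, if_neg h]
      simp

theorem filterMap_if (l : List Nat) (p : Nat → Bool) (f : Nat → Char) :
    l.filterMap (fun i => if p i then some (f i) else none) = (l.filter p).map f := by
  induction l with
  | nil => rfl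
  | cons a t ih =>
    by_cases h : p a <;> simp [List.filterMap_cons, List.filter_cons, h, ih]

-- Newton integer square root is Nat.sqrt
theorem amgm (m x : Nat) (hx : 1 ≤ x) : Nat.sqrt m ≤ (x + m / x) / 2 := by
  have hs : Nat.sqrt m * Nat.sqrt m ≤ m := Nat.sqrt_le m
  have h1 := Nat.div_add_mod m x
  have h2 : m % x < x := Nat.mod_lt m (by omega)
  have hm : m < (m / x + 1) * x := by nlinarith
  rw [Nat.le_div_iff_mul_le (by norm_num)]
  by_contra hc
  push_neg at hc
  zify at *
  nlinarith [sq_nonneg ((Nat.sqrt m : ℤ) - x)]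

theorem newton_spec (m : Nat) :
    ∀ x, 1 ≤ m → 1 ≤ x → m < (x + 1) * (x + 1) →
      newtonIter m x * newtonIter m x ≤ m ∧
        m < (newtonIter m x + 1) * (newtonIter m x + 1) := by
  intro x
  induction x using Nat.strong_induction_on with
  | _ x ih =>
    intro hm hx hup
    rw [newtonIter]
    by_cases h : (x + m / x) / 2 < x
    · simp only [h, dif_pos]
      have hsy : Nat.sqrt m ≤ (x + m / x) / 2 := amgm m x hx
      have hs1 : 1 ≤ Nat.sqrt m := Nat.le_sqrt.mpr (by omega)
      refine ih _ h hm (by omega) ?_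
      have := Nat.sqrt_lt.mp (show Nat.sqrt m < (x + m / x) / 2 + 1 by omega)
      exact this
    · simp only [h, dif_neg, not_false_iff]
      refine ⟨?_, hup⟩
      have h' : x ≤ (x + m / x) / 2 := by omega
      rw [Nat.le_div_iff_mul_le (by norm_num)] at h'
      have : x ≤ m / x := by omega
      rw [Nat.le_div_iff_mul_le (by omega)] at this
      exact this

theorem pyIsqrt_eq (m : Nat) : pyIsqrt m = Nat.sqrt m := by
  unfold pyIsqrt
  by_cases h : m ≤ 1
  · rw [if_pos h]
    interval_cases m <;> simp
  · rw [if_neg h]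
    have h1 : 1 ≤ m / 2 := by omega
    have hup : m < (m / 2 + 1) * (m / 2 + 1) := by
      have h2 : m ≤ 2 * (m / 2) + 1 := by omega
      nlinarith
    obtain ⟨hlo, hhi⟩ := newton_spec m (m / 2) (by omega) h1 hup
    have ha : newtonIter m (m / 2) ≤ Nat.sqrt m := Nat.le_sqrt.mpr hlo
    have hb : Nat.sqrt m < newtonIter m (m / 2) + 1 := Nat.sqrt_lt.mpr hhi
    omega

-- 8*i+9 is a perfect square iff the 1-based position i+1 is a triangular number
theorem square_iff_tri (i : Nat) :
    pyIsSquare (8 * i + 9) = true ↔ ∃ k, 1 ≤ k ∧ i + 1 = tri k := by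
  unfold pyIsSquare
  rw [beq_iff_eq, pyIsqrt_eq, ← Nat.exists_mul_self]
  constructor
  · rintro ⟨t, ht⟩
    rcases Nat.even_or_odd t with ⟨u, rfl⟩ | ⟨u, rfl⟩
    · exfalso
      have h4 : 4 * (u * u) = 8 * i + 9 := by nlinarith
      omega
    · have hu : u * (u + 1) = 2 * (i + 1) := by nlinarith
      refine ⟨u, ?_, ?_⟩
      · rcases u with _ | u
        · simp at hu
        · omega
      · have := two_mul_tri u
        omega
  · rintro ⟨k, hk, hik⟩
    have h2 : 2 * tri k = k * (k + 1) := two_mul_tri k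
    refine ⟨2 * k + 1, ?_⟩
    nlinarith

-- the two index lists agree
theorem filter_range_eq (n : Nat) :
    (List.range n).filter (fun i => pyIsSquare (8 * i + 9)) = triIdxs n 1 := by
  have p1 : List.Pairwise (· < ·) ((List.range n).filter (fun i => pyIsSquare (8 * i + 9))) :=
    List.Pairwise.filter _ List.pairwise_lt_range
  have p2 : List.Pairwise (· < ·) (triIdxs n 1) := pairwise_triIdxs n 1 (le_refl 1)
  have nd1 := p1.imp (fun h => Nat.ne_of_lt h)
  have nd2 := p2.imp (fun h => Nat.ne_of_lt h)
  have hperm : ((List.range n).filter (fun i => pyIsSquare (8 * i + 9))).Perm (triIdxs n 1) := by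
    rw [List.perm_ext_iff_of_nodup nd1 nd2]
    intro i
    rw [List.mem_filter, List.mem_range, mem_triIdxs]
    rw [square_iff_tri]
    constructor
    · rintro ⟨hn, k, hk, hik⟩
      have := tri_ge k
      exact ⟨k, hk, by omega, by omega⟩
    · rintro ⟨k, hk, hkn, rfl⟩
      have := tri_ge k
      exact ⟨by omega, k, hk, by omega⟩
  exact List.eq_of_perm_of_sorted (fun a b _ _ hab hba => by omega) p1 p2 hperm

-- ===== VERDICT (by name: the statement is the Claim_ definition above) =====
theorem rajut_spec : Claim_equal_rajut := by
  intro huruf _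
  unfold Spec_rajut rajut rajut_alt
  have h1 : rajutLoopA huruf.toList (huruf.toList.length + 1) [] 2 1 =
      (triIdxs huruf.toList.length 1).map (fun i => huruf.toList.getD i ' ') := by
    have := loopA_eq huruf.toList (huruf.toList.length + 1) 1 [] (by omega)
    simpa [tri] using this
  rw [h1, filterMap_if, filter_range_eq]
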